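-- pv_equiv track=rewrite | github.com/T-Lind/2DEncoding | Encode2D/__init__.py | slow_encode
-- ===== SOURCE A (Python) =====
-- def slow_encode(x, y) -> int:
--     maximum = max(abs(x), abs(y))
--     min_term = 4 * maximum ** 2 - 4 * maximum
--     max_term = 4 * maximum ** 2 + 6 * maximum
--     for n in range(min_term, max_term + 1):
--         extrapolated = decode(n)
--         if extrapolated == (x, y):
--             return n
--     raise IndexError("No suitable n found!")
--
-- def decode(n) -> [int, int]:
--     radius = 0
--     while 4 * radius ** 2 + 4 * radius < n:
--         radius += 1
--
--     main_term = 4 * radius ** 2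
--
--     if n <= main_term - 2 * radius:
--         difference = (main_term - 2 * radius) - n
--         return (radius, radius - difference)
--     elif n <= main_term:
--         difference = n - (main_term - 2 * radius)
--         return (radius - difference, radius)
--     elif n <= main_term + 2 * radius:
--         difference = (main_term + 2 * radius) - n
--         return (-radius, -(radius - difference))
--     elif n <= main_term + 4 * radius:
--         difference = (main_term + 4 * radius) - n
--         return (radius - difference, -radius)
--     else:
--         raise IndexError(f"{n} is out of range!")
-- ===== SOURCE B (Python) =====
-- def slow_encode(x, y) -> int:
--     # O(1): invert decode's four piecewise-linear arms directly.
--     r = max(abs(x), abs(y))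
--     if x == r and y > -r:
--         return 4 * r * r - 3 * r + y
--     if y == r and x < r:
--         return 4 * r * r - r - x
--     if x == -r and y < r:
--         return 4 * r * r + r - y
--     return 4 * r * r + 3 * r + x
-- ===== Notes on version B (the rewrite author's own statement) =====
-- stated objective: faster
-- what changed: B replaces A's linear search over the whole spiral ring (calling decode, itself a quadratic radius scan, on each candidate index) by a direct O(1) inversion of decode's four piecewise-linear arms selected from the signs of x and y.
import Mathlib
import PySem

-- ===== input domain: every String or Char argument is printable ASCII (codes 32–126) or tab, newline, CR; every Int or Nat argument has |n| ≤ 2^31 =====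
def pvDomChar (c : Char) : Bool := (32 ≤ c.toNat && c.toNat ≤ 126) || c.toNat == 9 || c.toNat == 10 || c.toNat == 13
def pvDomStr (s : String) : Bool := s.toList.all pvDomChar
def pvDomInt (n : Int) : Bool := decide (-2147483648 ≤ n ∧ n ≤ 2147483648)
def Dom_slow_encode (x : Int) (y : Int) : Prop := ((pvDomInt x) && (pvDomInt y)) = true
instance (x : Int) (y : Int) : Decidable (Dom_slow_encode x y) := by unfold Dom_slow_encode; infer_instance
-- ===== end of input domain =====

-- B inverts decode's piecewise-linear arms in O(1) instead of A's linear scan of the spiral ring (faster, asymptotic).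

-- ===== PORT A =====
-- decode's while loop, as fuel recursion; fuel n.natAbs + 1 always suffices (the loop
-- stops at radius ≤ max 0 n), so the port is exact.
def findRadius (n : Int) : Int → Nat → Int
  | r, 0 => r
  | r, Nat.succ fuel => if 4 * r ^ 2 + 4 * r < n then findRadius n (r + 1) fuel else r

-- decode(n); with the found radius r we have n ≤ 4r²+4r, so Python's final raise branch
-- is unreachable and the last arm is a plain else.
def decode (n : Int) : Int × Int :=
  let radius := findRadius n 0 (n.natAbs + 1)
  let main_term := 4 * radius ^ 2
  if n ≤ main_term - 2 * radius then (radius, radius - ((main_term - 2 * radius) - n))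
  else if n ≤ main_term then (radius - (n - (main_term - 2 * radius)), radius)
  else if n ≤ main_term + 2 * radius then (-radius, -(radius - ((main_term + 2 * radius) - n)))
  else (radius - ((main_term + 4 * radius) - n), -radius)

-- the for-loop: first n in the sequence with decode n = (x, y)
def encodeLoop (x : Int) (y : Int) : List Int → Option Int
  | [] => none
  | n :: rest => if decode n = (x, y) then some n else encodeLoop x y rest

-- Python raises IndexError when the loop falls through; that never happens (the proof
-- below shows a match always exists), so the .getD 0 default is dead code.
def slow_encode (x : Int) (y : Int) : Int :=
  let maximum := max |x| |y|
  let min_term := 4 * maximum ^ 2 - 4 * maximum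
  let max_term := 4 * maximum ^ 2 + 6 * maximum
  (encodeLoop x y (PySem.List.pyRange min_term (max_term + 1) 1)).getD 0

-- ===== PORT B =====
def slow_encode_alt (x : Int) (y : Int) : Int :=
  let r := max |x| |y|
  if x = r ∧ y > -r then 4 * r * r - 3 * r + y
  else if y = r ∧ x < r then 4 * r * r - r - x
  else if x = -r ∧ y < r then 4 * r * r + r - y
  else 4 * r * r + 3 * r + x

-- ===== PRECONDITION & SPEC =====
def Spec_slow_encode (x : Int) (y : Int) (out : Int) : Prop := out = slow_encode_alt x y
instance (x : Int) (y : Int) (out : Int) : Decidable (Spec_slow_encode x y out) := by unfold Spec_slow_encode; infer_instance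

-- ===== CLAIM (what is proved, stated in full; the proofs are below) =====
def Claim_equal_slow_encode : Prop := ∀ (x : Int) (y : Int), Dom_slow_encode x y → Spec_slow_encode x y (slow_encode x y)

-- ===== LEMMAS AND PROOFS =====

-- the while loop reaches exactly the first radius r with n ≤ 4r²+4r, given enough fuel
lemma findRadius_eq (n r : Int) (hrange : n ≤ 4 * r ^ 2 + 4 * r)
    (hmin : ∀ r', 0 ≤ r' → r' < r → 4 * r' ^ 2 + 4 * r' < n) :
    ∀ (fuel : Nat) (r₀ : Int), 0 ≤ r₀ → r₀ ≤ r → (r - r₀).toNat < fuel →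
      findRadius n r₀ fuel = r := by
  intro fuel
  induction fuel with
  | zero => intro r₀ _ _ h2; omega
  | succ f ih =>
    intro r₀ h0 h1 h2
    rw [findRadius]
    by_cases hlt : 4 * r₀ ^ 2 + 4 * r₀ < n
    · rw [if_pos hlt]
      rcases eq_or_lt_of_le h1 with he | hlt2
      · exact absurd hrange (by rw [he] at hlt; linarith)
      · exact ih (r₀ + 1) (by omega) (by omega) (by omega)
    · rw [if_neg hlt]
      rcases eq_or_lt_of_le h1 with he | hlt2
      · exact he
      · exact absurd (hmin r₀ h0 hlt2) hlt

lemma findRadius_ring (n r : Int) (hr : 1 ≤ r) (h1 : 4 * r ^ 2 - 4 * r < n)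
    (h2 : n ≤ 4 * r ^ 2 + 4 * r) : findRadius n 0 (n.natAbs + 1) = r := by
  have hnr : r ≤ n := by nlinarith
  apply findRadius_eq n r h2
  · intro r' h0 hlt
    have : 4 * r' ^ 2 + 4 * r' ≤ 4 * r ^ 2 - 4 * r := by nlinarith
    linarith
  · omega
  · linarith
  · omega

lemma findRadius_min (r : Int) (hr : 1 ≤ r) :
    findRadius (4 * r ^ 2 - 4 * r) 0 ((4 * r ^ 2 - 4 * r).natAbs + 1) = r - 1 := by
  have hpos : 0 ≤ 4 * r ^ 2 - 4 * r := by nlinarith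
  have hge : r - 1 ≤ 4 * r ^ 2 - 4 * r := by nlinarith
  apply findRadius_eq
  · linarith
  · intro r' h0 hlt
    nlinarith
  · omega
  · linarith
  · omega

lemma findRadius_top (r m : Int) (hr : 0 ≤ r) (h1 : 4 * r ^ 2 + 4 * r < m)
    (h2 : m ≤ 4 * r ^ 2 + 6 * r) : findRadius m 0 (m.natAbs + 1) = r + 1 := by
  have hmr : r + 1 ≤ m := by nlinarith
  apply findRadius_eq
  · linarith
  · intro r' h0 hlt
    have : 4 * r' ^ 2 + 4 * r' ≤ 4 * r ^ 2 + 4 * r := by nlinarith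
    linarith
  · omega
  · linarith
  · omega

-- decode on the ring of radius r ≥ 1, in closed form
lemma decode_ring (r n : Int) (hr : 1 ≤ r) (h1 : 4 * r ^ 2 - 4 * r < n)
    (h2 : n ≤ 4 * r ^ 2 + 4 * r) :
    decode n = if n ≤ 4 * r ^ 2 - 2 * r then (r, n - 4 * r ^ 2 + 3 * r)
      else if n ≤ 4 * r ^ 2 then (4 * r ^ 2 - r - n, r)
      else if n ≤ 4 * r ^ 2 + 2 * r then (-r, 4 * r ^ 2 + r - n)
      else (n - 4 * r ^ 2 - 3 * r, -r) := by
  simp only [decode, findRadius_ring n r hr h1 h2]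
  split_ifs <;> simp only [Prod.mk.injEq, and_true, true_and] <;> ring

lemma decode_minterm (r : Int) (hr : 1 ≤ r) :
    decode (4 * r ^ 2 - 4 * r) = (r - 1, -(r - 1)) := by
  simp only [decode, findRadius_min r hr]
  rcases eq_or_lt_of_le hr with he | hr2
  · rw [← he]; norm_num
  · rw [if_neg (by linarith), if_neg (by linarith), if_neg (by linarith)]
    simp only [Prod.mk.injEq, and_true]
    ring

lemma decode_top (r m : Int) (hr : 0 ≤ r) (h1 : 4 * r ^ 2 + 4 * r < m)
    (h2 : m ≤ 4 * r ^ 2 + 6 * r) : (decode m).1 = r + 1 := by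
  simp only [decode, findRadius_top r m hr h1 h2]
  rw [if_pos (by linarith)]

-- B's value lies inside the ring and decodes back to (x, y)
lemma alt_dec (x y r : Int) (hr : 1 ≤ r) (hmax : max |x| |y| = r)
    (hx1 : -r ≤ x) (hx2 : x ≤ r) (hy1 : -r ≤ y) (hy2 : y ≤ r)
    (hd : x = r ∨ x = -r ∨ y = r ∨ y = -r) :
    (4 * r ^ 2 - 4 * r < slow_encode_alt x y ∧ slow_encode_alt x y ≤ 4 * r ^ 2 + 4 * r) ∧
      decode (slow_encode_alt x y) = (x, y) := by
  simp only [slow_encode_alt, hmax]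
  split_ifs with c1 c2 c3
  · obtain ⟨e1, e2⟩ := c1
    refine ⟨⟨by linarith, by linarith⟩, ?_⟩
    rw [decode_ring r _ hr (by linarith) (by linarith), if_pos (by linarith)]
    simp only [Prod.mk.injEq]; constructor <;> linarith
  · obtain ⟨e1, e2⟩ := c2
    refine ⟨⟨by linarith, by linarith⟩, ?_⟩
    rw [decode_ring r _ hr (by linarith) (by linarith),
      if_neg (by intro h; linarith), if_pos (by linarith)]
    simp only [Prod.mk.injEq]; constructor <;> linarith
  · obtain ⟨e1, e2⟩ := c3
    refine ⟨⟨by linarith, by linarith⟩, ?_⟩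
    rw [decode_ring r _ hr (by linarith) (by linarith),
      if_neg (by intro h; linarith), if_neg (by intro h; linarith),
      if_pos (by linarith)]
    simp only [Prod.mk.injEq]; constructor <;> linarith
  · -- else branch: from the failed tests and max(|x|,|y|) = r we get y = -r and -r < x
    have hy : y = -r ∧ -r < x := by
      rcases hd with e | e | e | e
      · exact ⟨by by_contra h; exact c1 ⟨e, by omega⟩, by omega⟩
      · constructor
        · by_contra h
          by_cases hyr : y = r
          · exact c2 ⟨hyr, by omega⟩
          · exact c3 ⟨e, by omega⟩
        · by_cases hyr : y = r
          · exact absurd ⟨hyr, by omega⟩ c2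
          · exact absurd ⟨e, by omega⟩ c3
      · by_cases hxr : x = r
        · exact absurd ⟨hxr, by omega⟩ c1
        · exact absurd ⟨e, by omega⟩ c2
      · constructor
        · exact e
        · by_contra h
          exact c3 ⟨by omega, by omega⟩
    obtain ⟨e1, e2⟩ := hy
    refine ⟨⟨by linarith, by linarith⟩, ?_⟩
    rw [decode_ring r _ hr (by linarith) (by linarith),
      if_neg (by intro h; linarith), if_neg (by intro h; linarith),
      if_neg (by intro h; linarith)]
    simp only [Prod.mk.injEq]; constructor <;> linarith

-- any other ring index decoding to (x, y) is B's value
lemma alt_unique (x y r m : Int) (hr : 1 ≤ r) (hmax : max |x| |y| = r)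
    (hm1 : 4 * r ^ 2 - 4 * r < m) (hm2 : m ≤ 4 * r ^ 2 + 4 * r)
    (h : decode m = (x, y)) : m = slow_encode_alt x y := by
  rw [decode_ring r m hr hm1 hm2] at h
  simp only [slow_encode_alt, hmax]
  split_ifs at h with c1 c2 c3 <;>
    simp only [Prod.mk.injEq] at h <;> obtain ⟨hx, hy⟩ := h
  · rw [if_pos ⟨hx.symm, by linarith⟩]; linarith
  · rw [if_neg (by rintro ⟨e, -⟩; linarith), if_pos ⟨hy.symm, by linarith⟩]; linarith
  · rw [if_neg (by rintro ⟨e, -⟩; linarith), if_neg (by rintro ⟨e, -⟩; linarith),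
      if_pos ⟨hx.symm, by linarith⟩]
    linarith
  · rw [if_neg (by rintro ⟨-, e⟩; linarith), if_neg (by rintro ⟨e, -⟩; linarith),
      if_neg (by rintro ⟨e, -⟩; linarith)]
    linarith

-- the for-loop returns the unique match in the scanned list
lemma encodeLoop_first (x y n₀ : Int) :
    ∀ l : List Int, n₀ ∈ l → (∀ m ∈ l, decode m = (x, y) ↔ m = n₀) →
      encodeLoop x y l = some n₀ := by
  intro l
  induction l with
  | nil => simp
  | cons a t ih =>
    intro hmem hiff
    rw [encodeLoop]
    by_cases h : decode a = (x, y)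
    · rw [if_pos h, (hiff a (by simp)).mp h]
    · rw [if_neg h]
      have hne : a ≠ n₀ := fun e => h ((hiff a (by simp)).mpr e)
      apply ih
      · rcases List.mem_cons.mp hmem with e | e
        · exact absurd e.symm hne
        · exact e
      · intro m hm; exact hiff m (List.mem_cons_of_mem _ hm)

-- ===== VERDICT (by name: the statement is the Claim_ definition above) =====
theorem slow_encode_spec : Claim_equal_slow_encode := by
  intro x y _
  unfold Spec_slow_encode
  set r := max |x| |y| with hmax
  have habsx : |x| ≤ r := le_max_left _ _
  have habsy : |y| ≤ r := le_max_right _ _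
  obtain ⟨hx1, hx2⟩ := abs_le.mp habsx
  obtain ⟨hy1, hy2⟩ := abs_le.mp habsy
  have hd : x = r ∨ x = -r ∨ y = r ∨ y = -r := by
    rcases max_choice |x| |y| with h | h <;> rw [hmax, h]
    · rcases abs_cases x with ⟨e, -⟩ | ⟨e, -⟩
      · left; omega
      · right; left; omega
    · rcases abs_cases y with ⟨e, -⟩ | ⟨e, -⟩
      · right; right; left; omega
      · right; right; right; omega
  have hr0 : 0 ≤ r := le_trans (abs_nonneg x) habsx
  rcases eq_or_lt_of_le hr0 with hr | hr1
  · -- r = 0: x = y = 0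
    have hx : x = 0 := by omega
    have hy : y = 0 := by omega
    subst hx; subst hy
    decide
  · -- 1 ≤ r
    have hr : 1 ≤ r := hr1
    obtain ⟨⟨hlo, hhi⟩, hdec⟩ :=
      alt_dec x y r hr hmax.symm hx1 hx2 hy1 hy2 hd
    simp only [slow_encode]
    rw [← hmax]
    rw [encodeLoop_first x y (slow_encode_alt x y) _
      (PySem.List.mem_pyRange_one.mpr ⟨by linarith, by linarith⟩) ?_]
    · rfl
    · intro m hm
      obtain ⟨hm1, hm2⟩ := PySem.List.mem_pyRange_one.mp hm
      constructor
      · intro hdm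
        rcases eq_or_lt_of_le hm1 with he | hlt
        · -- m = min_term: decode gives the inner ring's corner, impossible
          rw [← he, decode_minterm r hr] at hdm
          simp only [Prod.mk.injEq] at hdm
          omega
        · by_cases hin : m ≤ 4 * r ^ 2 + 4 * r
          · exact alt_unique x y r m hr hmax.symm hlt hin hdm
          · have := decode_top r m (by linarith) (by linarith) (by linarith)
            rw [hdm] at this
            simp only at this
            linarith
      · intro e; rw [e]; exact hdec
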